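-- pv_equiv track=rewrite | github.com/vyjayanv-hub/112_TP_Vasudevan | main.py | extractChapters
-- ===== SOURCE A (Python) =====
-- def extractChapters(pages):
--     chapters = []
--     for pageIndex, pageText in enumerate(pages):
--         for line in pageText.split('\n'):
--             if looksLikeChapterHeading(line):
--                 if not chapters or chapters[-1][0] != line.strip():
--                     chapters.append((line.strip(), pageIndex))
--     return chapters
--
-- def looksLikeChapterHeading(line):
--     stripped = line.strip()
--     if not stripped or len(stripped) > 60:
--         return False
--     lower = stripped.lower()
--     keywords = ['chapter', 'act', 'part', 'book', 'section', 'prologue', 'epilogue']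
--     for word in keywords:
--         if lower.startswith(word):
--             return True
--
--     if stripped.isupper() and 3 < len(stripped) < 50:
--         return True
--     if stripped.endswith('.') and stripped[:-1].isdigit():
--         return True
--     return False
-- ===== SOURCE B (Python) =====
-- def looksLikeChapterHeading(line):
--     stripped = line.strip()
--     if not stripped or len(stripped) > 60:
--         return False
--     lower = stripped.lower()
--     keywords = ['chapter', 'act', 'part', 'book', 'section', 'prologue', 'epilogue']
--     for word in keywords:
--         if lower.startswith(word):
--             return True
--     if stripped.isupper() and 3 < len(stripped) < 50:
--         return True
--     if stripped.endswith('.') and stripped[:-1].isdigit():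
--         return True
--     return False
--
-- def extractChapters(pages):
--     # all heading candidates with their page index
--     cands = [(line.strip(), pageIndex)
--              for pageIndex, pageText in enumerate(pages)
--              for line in pageText.split('\n')
--              if looksLikeChapterHeading(line)]
--
--     # divide and conquer: collapse each half independently, then merge,
--     # dropping the right half's head when its text equals the left half's last text
--     # (run-collapsing is associative under this merge, so the split point is irrelevant)
--     def merge(L, R):
--         if L and R and R[0][0] == L[-1][0]:
--             return L + R[1:]
--         return L + R
--
--     def collapse(seg):
--         if len(seg) <= 1:
--             return seg
--         mid = len(seg) // 2
--         return merge(collapse(seg[:mid]), collapse(seg[mid:]))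
--
--     return collapse(cands)
-- ===== Notes on version B (the rewrite author's own statement) =====
-- stated objective: alternative
-- what changed: B collapses consecutive duplicate headings by divide and conquer instead of A's fused left-to-right scan with a chapters[-1] check: it gathers all (stripped line, page index) candidates, recursively collapses each half of the candidate list independently, and merges halves by dropping the right half's head when it repeats the left half's last heading text.
import Mathlib
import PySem

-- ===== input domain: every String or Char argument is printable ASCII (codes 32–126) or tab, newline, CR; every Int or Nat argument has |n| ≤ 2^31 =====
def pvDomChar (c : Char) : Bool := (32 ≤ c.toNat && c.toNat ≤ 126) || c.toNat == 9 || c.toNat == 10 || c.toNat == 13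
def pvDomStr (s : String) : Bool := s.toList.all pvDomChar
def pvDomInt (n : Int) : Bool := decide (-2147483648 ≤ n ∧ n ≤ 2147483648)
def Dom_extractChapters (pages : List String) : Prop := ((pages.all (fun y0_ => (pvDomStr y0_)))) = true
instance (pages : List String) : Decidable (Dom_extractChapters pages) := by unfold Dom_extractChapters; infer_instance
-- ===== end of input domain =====

-- B collapses consecutive duplicate headings by divide and conquer over the candidate list
-- (merge drops the right half's head if it repeats the left half's last text); alternative, same output.


-- ===== PORT A =====
-- shared helper: looksLikeChapterHeading (identical in A and B; B keeps it unchanged).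
-- str.isupper() is not in PySem: ported by hand — on the ASCII domain the cased characters
-- are exactly the letters, so isupper(s) = (some uppercase letter present) ∧ (no lowercase letter).
def pvStrIsupper (s : String) : Bool :=
  s.toList.any PySem.Chars.isupper && s.toList.all (fun c => ! PySem.Chars.islower c)

def looksLikeChapterHeading (line : String) : Bool :=
  let stripped := PySem.Str.strip line
  if stripped = "" || PySem.Str.len stripped > 60 then false
  else
    let lower := PySem.Str.lower stripped
    let keywords := ["chapter", "act", "part", "book", "section", "prologue", "epilogue"]
    if keywords.any (fun w => PySem.Str.startswith lower w) then true
    else if pvStrIsupper stripped && 3 < PySem.Str.len stripped && PySem.Str.len stripped < 50 then true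
    else if PySem.Str.endswith stripped "." && PySem.Str.strIsdigit (PySem.Str.slice stripped none (some (-1))) then true
    else false

def extractChapters (pages : List String) : List (String × Int) :=
  (PySem.List.enumerate pages).foldl
    (fun chapters (pi : Int × String) =>
      ((PySem.Str.split? pi.2 "\n").getD []).foldl
        (fun ch line =>
          if looksLikeChapterHeading line then
            if ch = [] ∨ (PySem.List.pyGet? ch (-1)).map Prod.fst ≠ some (PySem.Str.strip line) then
              ch ++ [(PySem.Str.strip line, pi.1)]
            else ch
          else ch)
        chapters)
    []

-- ===== PORT B =====
-- all heading candidates with their page index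
def pvCandidates (pages : List String) : List (String × Int) :=
  (PySem.List.enumerate pages).flatMap
    (fun pi => (((PySem.Str.split? pi.2 "\n").getD []).filter looksLikeChapterHeading).map
      (fun line => (PySem.Str.strip line, pi.1)))

-- merge two collapsed halves: drop R's head if its text equals L's last text
def pvMerge (L R : List (String × Int)) : List (String × Int) :=
  match L.getLast?, R with
  | some l, r :: rs => if r.1 = l.1 then L ++ rs else L ++ r :: rs
  | _, _ => L ++ R

-- divide and conquer: collapse each half, then merge
def pvCollapseDC (xs : List (String × Int)) : List (String × Int) :=
  if h : xs.length ≤ 1 then xs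
  else
    pvMerge (pvCollapseDC (xs.take (xs.length / 2))) (pvCollapseDC (xs.drop (xs.length / 2)))
termination_by xs.length
decreasing_by
  · simp only [List.length_take]; omega
  · simp only [List.length_drop]; omega

def extractChapters_alt (pages : List String) : List (String × Int) :=
  pvCollapseDC (pvCandidates pages)

-- ===== PRECONDITION & SPEC =====
def Spec_extractChapters (pages : List String) (out : List (String × Int)) : Prop := out = extractChapters_alt pages
instance (pages : List String) (out : List (String × Int)) : Decidable (Spec_extractChapters pages out) := by unfold Spec_extractChapters; infer_instance

-- ===== CLAIM (what is proved, stated in full; the proofs are below) =====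
def Claim_equal_extractChapters : Prop := ∀ (pages : List String), Dom_extractChapters pages → Spec_extractChapters pages (extractChapters pages)

-- ===== LEMMAS AND PROOFS =====

-- A's inner-loop step, on one candidate (stripped text, page index)
def pvStep (ch : List (String × Int)) (c : String × Int) : List (String × Int) :=
  if ch = [] ∨ (PySem.List.pyGet? ch (-1)).map Prod.fst ≠ some c.1 then ch ++ [c] else ch

-- linear-scan collapse relative to a previous-text cursor (the reference semantics both sides meet)
def pvCollapse : Option String → List (String × Int) → List (String × Int)
  | _, [] => []
  | prev, c :: cs => if some c.1 = prev then pvCollapse prev cs else c :: pvCollapse (some c.1) cs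

lemma inner_foldl_eq (i : Int) (lines : List String) (acc : List (String × Int)) :
    lines.foldl
      (fun ch line =>
        if looksLikeChapterHeading line then
          if ch = [] ∨ (PySem.List.pyGet? ch (-1)).map Prod.fst ≠ some (PySem.Str.strip line) then
            ch ++ [(PySem.Str.strip line, i)]
          else ch
        else ch)
      acc
    = ((lines.filter looksLikeChapterHeading).map (fun line => (PySem.Str.strip line, i))).foldl pvStep acc := by
  induction lines generalizing acc with
  | nil => rfl
  | cons l ls ih =>
    by_cases h : looksLikeChapterHeading l = true
    · simp [List.foldl, h, pvStep, ih]
    · simp [List.foldl, h, ih]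

lemma foldl_A_eq_candidates (pages : List String) :
    extractChapters pages = (pvCandidates pages).foldl pvStep [] := by
  unfold extractChapters pvCandidates
  rw [List.foldl_flatMap]
  exact PySem.List.foldl_congr_mem _ _ _ _
    (fun acc pi _ => inner_foldl_eq pi.1 ((PySem.Str.split? pi.2 "\n").getD []) acc)

lemma foldl_step_collapse (cs : List (String × Int)) (acc : List (String × Int)) :
    cs.foldl pvStep acc = acc ++ pvCollapse ((PySem.List.pyGet? acc (-1)).map Prod.fst) cs := by
  induction cs generalizing acc with
  | nil => simp [pvCollapse]
  | cons c cs ih =>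
    rw [List.foldl_cons, ih]
    unfold pvStep
    rcases List.eq_nil_or_concat acc with rfl | ⟨b, x, rfl⟩
    · rw [if_pos (Or.inl rfl), List.nil_append]
      simp [PySem.List.pyGet?_neg_one, pvCollapse]
    · rw [List.concat_eq_append]
      by_cases heq : x.1 = c.1
      · rw [if_neg (by simp [heq])]
        simp [pvCollapse, heq]
      · rw [if_pos (Or.inr (by simp [heq])), List.append_assoc]
        simp [PySem.List.pyGet?_neg_one, pvCollapse, Ne.symm heq]

-- pvCollapse none keeps the head
lemma collapse_none_cons (c : String × Int) (cs : List (String × Int)) :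
    pvCollapse none (c :: cs) = c :: pvCollapse (some c.1) cs := by
  simp [pvCollapse]

lemma getLast?_cons_of_ne_nil (a : String × Int) (l : List (String × Int)) (h : l ≠ []) :
    (a :: l).getLast? = l.getLast? := by
  cases l with
  | nil => exact absurd rfl h
  | cons b bs => exact List.getLast?_cons_cons

-- if the collapse with cursor t is empty, every element (so the last) has text t
lemma collapse_nil_of_all_eq (t : String) (ds : List (String × Int)) (hd : ds ≠ [])
    (hcol : pvCollapse (some t) ds = []) : (ds.getLast hd).1 = t := by
  induction ds generalizing t with
  | nil => exact absurd rfl hd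
  | cons d ds ih2 =>
    rw [pvCollapse] at hcol
    by_cases hdt : some d.1 = some t
    · rw [if_pos hdt] at hcol
      by_cases hds : ds = []
      · subst hds; simpa using hdt
      · rw [List.getLast_cons hds]
        exact ih2 t hds hcol
    · rw [if_neg hdt] at hcol; exact absurd hcol (by simp)

-- a nonempty collapse ends with the input's last text
lemma collapse_getLast?_fst (p : Option String) (L : List (String × Int))
    (h' : pvCollapse p L ≠ []) :
    (pvCollapse p L).getLast?.map Prod.fst = L.getLast?.map Prod.fst := by
  induction L generalizing p with
  | nil => simp [pvCollapse] at h'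
  | cons c cs ih =>
    by_cases he : some c.1 = p
    · rw [pvCollapse, if_pos he] at h' ⊢
      by_cases hcs : cs = []
      · subst hcs; simp [pvCollapse] at h'
      · rw [ih p h', getLast?_cons_of_ne_nil c cs hcs]
    · rw [pvCollapse, if_neg he] at h' ⊢
      by_cases h2 : pvCollapse (some c.1) cs = []
      · rw [h2]
        by_cases hcs : cs = []
        · subst hcs; rfl
        · have hlast := collapse_nil_of_all_eq c.1 cs hcs h2
          rw [getLast?_cons_of_ne_nil c cs hcs,
              List.getLast?_eq_some_getLast hcs, Option.map_some, hlast]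
          rfl
      · have hcs : cs ≠ [] := by intro hc; subst hc; exact h2 rfl
        rw [getLast?_cons_of_ne_nil c _ h2, getLast?_cons_of_ne_nil c cs hcs]
        exact ih (some c.1) h2

-- splitting anywhere and re-joining with the cursor at the left part's last text is sound
lemma collapse_append (p : Option String) (L R : List (String × Int)) (h : L ≠ []) :
    pvCollapse p (L ++ R) = pvCollapse p L ++ pvCollapse (some ((L.getLast h).1)) R := by
  induction L generalizing p with
  | nil => exact absurd rfl h
  | cons c cs ih =>
    by_cases hcs : cs = []
    · subst hcs
      by_cases he : some c.1 = p
      · simp [pvCollapse, he]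
      · simp [pvCollapse, he]
    · rw [List.cons_append, pvCollapse, pvCollapse]
      by_cases he : some c.1 = p
      · rw [if_pos he, if_pos he, ih p hcs, List.getLast_cons hcs]
      · rw [if_neg he, if_neg he, ih (some c.1) hcs, List.getLast_cons hcs, List.cons_append]

-- the cursor form vs the merge form on a collapsed right half
lemma collapse_some_eq (t : String) (R : List (String × Int)) (r : String × Int) (rs : List (String × Int))
    (hR : pvCollapse none R = r :: rs) :
    pvCollapse (some t) R = if r.1 = t then rs else r :: rs := by
  cases R with
  | nil => simp [pvCollapse] at hR
  | cons c cs =>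
    rw [collapse_none_cons] at hR
    injection hR with h1 h2
    subst h1
    rw [pvCollapse]
    by_cases he : c.1 = t
    · subst he
      rw [if_pos rfl, if_pos rfl, h2]
    · rw [if_neg (by simpa using he), if_neg he, h2]

lemma collapse_none_ne_nil (L : List (String × Int)) (h : L ≠ []) : pvCollapse none L ≠ [] := by
  cases L with
  | nil => exact absurd rfl h
  | cons c cs => rw [collapse_none_cons]; simp

lemma pvMerge_eq (L R : List (String × Int)) (l r : String × Int) (rs : List (String × Int))
    (hl : L.getLast? = some l) (hRe : R = r :: rs) :
    pvMerge L R = if r.1 = l.1 then L ++ rs else L ++ r :: rs := by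
  subst hRe; unfold pvMerge; rw [hl]

-- merging the two collapsed halves collapses the whole
lemma merge_collapse (L R : List (String × Int)) (hL : L ≠ []) (hR : R ≠ []) :
    pvMerge (pvCollapse none L) (pvCollapse none R) = pvCollapse none (L ++ R) := by
  have hCL := collapse_none_ne_nil L hL
  have hCR := collapse_none_ne_nil R hR
  obtain ⟨r, rs, hRe⟩ := List.exists_cons_of_ne_nil hCR
  have hlast : ((pvCollapse none L).getLast hCL).1 = (L.getLast hL).1 := by
    have h1 := collapse_getLast?_fst none L hCL
    rw [List.getLast?_eq_some_getLast hCL, List.getLast?_eq_some_getLast hL,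
        Option.map_some, Option.map_some] at h1
    exact Option.some.inj h1
  rw [pvMerge_eq _ _ _ r rs (List.getLast?_eq_some_getLast hCL) hRe,
      collapse_append none L R hL,
      collapse_some_eq ((L.getLast hL).1) R r rs hRe, hlast]
  by_cases he : r.1 = (L.getLast hL).1
  · rw [if_pos he, if_pos he]
  · rw [if_neg he, if_neg he]

-- the divide-and-conquer collapse computes the linear-scan collapse
lemma collapseDC_eq (xs : List (String × Int)) : pvCollapseDC xs = pvCollapse none xs := by
  induction xs using pvCollapseDC.induct with
  | case1 xs h =>
    rw [pvCollapseDC, dif_pos h]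
    match xs, h with
    | [], _ => rfl
    | [c], _ => simp [pvCollapse]
  | case2 xs h ih1 ih2 =>
    have ht : xs.take (xs.length / 2) ≠ [] := by
      intro hc
      have := congrArg List.length hc
      simp only [List.length_take, List.length_nil] at this
      omega
    have hd : xs.drop (xs.length / 2) ≠ [] := by
      intro hc
      have := congrArg List.length hc
      simp only [List.length_drop, List.length_nil] at this
      omega
    rw [pvCollapseDC, dif_neg h, ih1, ih2, merge_collapse _ _ ht hd, List.take_append_drop]

-- ===== VERDICT (by name: the statement is the Claim_ definition above) =====
theorem extractChapters_spec : Claim_equal_extractChapters := by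
  intro pages _
  unfold Spec_extractChapters extractChapters_alt
  rw [foldl_A_eq_candidates, foldl_step_collapse, collapseDC_eq]
  simp [PySem.List.pyGet?, PySem.List.pyIdx?]
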